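-- pv_equiv track=rewrite | github.com/posl/comment_recommendation | script/split_gen/5_time/zh/227_C/7.py | f
-- ===== SOURCE A (Python) =====
-- def f(n):
--     ans = 0
--     for a in range(1, n+1):
--         for b in range(a, n+1):
--             c = n // (a*b)
--             if c < b:
--                 break
--             if a <= b <= c:
--                 ans += 1
--     return ans
-- ===== SOURCE B (Python) =====
-- def f(n):
--     # Sweep a downward from floor(cbrt(n)) with a shared running root r = isqrt(n // a):
--     # for each a, count b in [a, r].
--     amax = 0
--     while (amax + 1) ** 3 <= n:
--         amax += 1
--     ans = 0
--     a = amax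
--     r = amax
--     while a >= 1:
--         while (r + 1) * (r + 1) * a <= n:
--             r += 1
--         ans += r - a + 1
--         a -= 1
--     return ans
-- ===== Notes on version B (the rewrite author's own statement) =====
-- stated objective: faster
-- what changed: Instead of scanning every candidate a up to n with an inner b-scan using floordiv and break, B bounds a by the cube root of n and sweeps a downward while maintaining a shared running integer root r incrementally, adding r-a+1 per a.
import Mathlib
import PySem

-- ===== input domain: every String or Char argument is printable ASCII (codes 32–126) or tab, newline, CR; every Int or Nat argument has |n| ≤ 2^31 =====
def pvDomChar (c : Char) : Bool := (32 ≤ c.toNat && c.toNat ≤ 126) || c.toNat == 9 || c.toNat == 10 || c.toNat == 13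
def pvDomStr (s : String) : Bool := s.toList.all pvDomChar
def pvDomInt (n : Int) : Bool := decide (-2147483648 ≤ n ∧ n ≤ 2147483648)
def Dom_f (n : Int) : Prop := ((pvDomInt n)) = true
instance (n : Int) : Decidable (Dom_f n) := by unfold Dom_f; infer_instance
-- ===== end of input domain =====

-- B replaces A's full scan of a in 1..n (with an inner floordiv/break b-scan) by a descending
-- sweep of a up to the cube root of n with a shared incrementally-maintained root; measured faster (asymptotic).

-- ===== PORT A =====
-- inner 'for b in range(a, n+1)' loop with its break
def fInner (n a : Int) : List Int → Int → Int
  | [], ans => ans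
  | b :: bs, ans =>
    let c := PySem.Int.floordiv n (a * b)
    if c < b then ans
    else fInner n a bs (if a ≤ b ∧ b ≤ c then ans + 1 else ans)

def f (n : Int) : Int :=
  (PySem.List.pyRange 1 (n + 1) 1).foldl
    (fun ans a => fInner n a (PySem.List.pyRange a (n + 1) 1) ans) 0

-- ===== PORT B =====
-- 'while (amax+1)**3 <= n: amax += 1'  (the 'm < n' conjunct only makes the loop total;
-- it is redundant whenever 0 ≤ m, which holds on every reachable state)
def fAmax (n m : Int) : Int :=
  if (m + 1) * (m + 1) * (m + 1) ≤ n ∧ m < n then fAmax n (m + 1) else m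
  termination_by (n - m).toNat
  decreasing_by omega

-- 'while (r+1)*(r+1)*a <= n: r += 1'  (the 'r < n' conjunct only makes the loop total;
-- it is redundant whenever 1 ≤ a and 0 ≤ r, which holds on every reachable state)
def fBump (n a r : Int) : Int :=
  if (r + 1) * (r + 1) * a ≤ n ∧ r < n then fBump n a (r + 1) else r
  termination_by (n - r).toNat
  decreasing_by omega

-- 'while a >= 1: …'
def fDown (n a r ans : Int) : Int :=
  if 1 ≤ a then fDown n (a - 1) (fBump n a r) (ans + fBump n a r - a + 1)
  else ans
  termination_by a.toNat
  decreasing_by omega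

def f_alt (n : Int) : Int :=
  let amax := fAmax n 0
  fDown n amax amax 0

-- ===== PRECONDITION & SPEC =====
def Spec_f (n : Int) (out : Int) : Prop := out = f_alt n
instance (n : Int) (out : Int) : Decidable (Spec_f n out) := by unfold Spec_f; infer_instance

-- ===== CLAIM (what is proved, stated in full; the proofs are below) =====
def Claim_equal_f : Prop := ∀ (n : Int), Dom_f n → Spec_f n (f n)

-- ===== LEMMAS AND PROOFS =====

-- per-a contribution: number of b in [a, n] with a*b*b ≤ n, written via fBump
def gTerm (n a : Int) : Int :=
  if a * a * a ≤ n then fBump n a a - a + 1 else 0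

-- partial sums of gTerm from 1 up to a
def gSum (n a : Int) : Int :=
  if 1 ≤ a then gTerm n a + gSum n (a - 1) else 0
  termination_by a.toNat
  decreasing_by omega

-- fBump characterisation
theorem fBump_spec (n a : Int) : ∀ r : Int, 1 ≤ a → 0 ≤ r → r * r * a ≤ n →
    r ≤ fBump n a r ∧ (fBump n a r) * (fBump n a r) * a ≤ n ∧
      n < (fBump n a r + 1) * (fBump n a r + 1) * a := by
  intro r
  induction r using fBump.induct n a with
  | case1 r hc ih =>
    intro ha hr hinv
    rw [fBump, if_pos hc]
    have := ih ha (by omega) hc.1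
    exact ⟨by omega, this.2.1, this.2.2⟩
  | case2 r hc =>
    intro ha hr hinv
    rw [fBump, if_neg hc]
    refine ⟨le_refl _, hinv, ?_⟩
    by_contra h
    push_neg at h
    have hrn : ¬ r < n := fun hlt => hc ⟨h, hlt⟩
    push_neg at hrn
    nlinarith

-- the characterisation determines the value uniquely
theorem root_unique (n a R1 R2 : Int) (ha : 1 ≤ a) (h1 : 0 ≤ R1) (h2 : 0 ≤ R2)
    (c1 : R1 * R1 * a ≤ n ∧ n < (R1 + 1) * (R1 + 1) * a)
    (c2 : R2 * R2 * a ≤ n ∧ n < (R2 + 1) * (R2 + 1) * a) : R1 = R2 := by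
  by_contra hne
  rcases lt_or_gt_of_ne hne with h | h
  · have : (R1 + 1) * (R1 + 1) * a ≤ R2 * R2 * a := by nlinarith
    omega
  · have : (R2 + 1) * (R2 + 1) * a ≤ R1 * R1 * a := by nlinarith
    omega

-- A's inner loop from a b0 already past the last valid b adds nothing
theorem fInner_stop (n a : Int) : ∀ b0 ans : Int, 1 ≤ a → a ≤ b0 → n < b0 * b0 * a →
    fInner n a (PySem.List.pyRange b0 (n + 1) 1) ans = ans := by
  intro b0 ans ha hb hstop
  by_cases hle : b0 < n + 1
  · rw [PySem.List.pyRange_one_cons hle]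
    show (if PySem.Int.floordiv n (a * b0) < b0 then ans else _) = ans
    have hab : 0 < a * b0 := by nlinarith
    rw [if_pos]
    rw [PySem.Int.floordiv_lt_iff_lt_mul hab]
    nlinarith
  · rw [PySem.List.pyRange_one_eq_nil (by omega)]
    rfl

-- A's inner loop from b0 counts exactly fBump n a b0 - b0 + 1 values of b
theorem fInner_go (n a : Int) : ∀ b0 ans : Int, 1 ≤ a → a ≤ b0 → b0 * b0 * a ≤ n →
    fInner n a (PySem.List.pyRange b0 (n + 1) 1) ans = ans + (fBump n a b0 - b0 + 1) := by
  intro b0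
  induction b0 using fBump.induct n a with
  | case1 b0 hc ih =>
    intro ans ha hb hinv
    have hb0n : b0 < n + 1 := by nlinarith
    rw [PySem.List.pyRange_one_cons hb0n]
    show (if PySem.Int.floordiv n (a * b0) < b0 then ans
          else fInner n a _ (if a ≤ b0 ∧ b0 ≤ PySem.Int.floordiv n (a * b0) then ans + 1 else ans)) = _
    have hab : 0 < a * b0 := by nlinarith
    have hnob : ¬ PySem.Int.floordiv n (a * b0) < b0 := by
      rw [PySem.Int.floordiv_lt_iff_lt_mul hab]
      nlinarith
    have hyes : b0 ≤ PySem.Int.floordiv n (a * b0) := by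
      rw [PySem.Int.le_floordiv_iff_mul_le hab]
      nlinarith
    have hstep : fBump n a b0 = fBump n a (b0 + 1) := by
      conv_lhs => rw [fBump]
      rw [if_pos hc]
    rw [if_neg hnob, if_pos ⟨hb, hyes⟩, ih (ans + 1) ha (by omega) hc.1, hstep]
    ring
  | case2 b0 hc =>
    intro ans ha hb hinv
    have hb0n : b0 < n + 1 := by nlinarith
    rw [PySem.List.pyRange_one_cons hb0n]
    show (if PySem.Int.floordiv n (a * b0) < b0 then ans
          else fInner n a _ (if a ≤ b0 ∧ b0 ≤ PySem.Int.floordiv n (a * b0) then ans + 1 else ans)) = _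
    have hab : 0 < a * b0 := by nlinarith
    have hnob : ¬ PySem.Int.floordiv n (a * b0) < b0 := by
      rw [PySem.Int.floordiv_lt_iff_lt_mul hab]
      nlinarith
    have hyes : b0 ≤ PySem.Int.floordiv n (a * b0) := by
      rw [PySem.Int.le_floordiv_iff_mul_le hab]
      nlinarith
    have hstop : n < (b0 + 1) * (b0 + 1) * a := by
      by_contra h
      push_neg at h
      have : b0 < n := by nlinarith
      exact hc ⟨h, this⟩
    have hstep : fBump n a b0 = b0 := by
      conv_lhs => rw [fBump]
      rw [if_neg hc]
    rw [if_neg hnob, if_pos ⟨hb, hyes⟩,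
        fInner_stop n a (b0 + 1) (ans + 1) ha (by omega) (by nlinarith), hstep]
    ring

-- one step of A's outer loop adds gTerm
theorem fInner_gTerm (n a ans : Int) (ha : 1 ≤ a) :
    fInner n a (PySem.List.pyRange a (n + 1) 1) ans = ans + gTerm n a := by
  unfold gTerm
  by_cases h : a * a * a ≤ n
  · rw [if_pos h, fInner_go n a a ans ha (le_refl a) h]
  · rw [if_neg h, fInner_stop n a a ans ha (le_refl a) (by nlinarith)]
    ring

-- A's outer foldl from a0 computes gSum n n - gSum n (a0 - 1)
theorem foldl_gSum (n : Int) : ∀ k : Nat, ∀ a0 ans : Int, 1 ≤ a0 → a0 = n + 1 - k →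
    (PySem.List.pyRange a0 (n + 1) 1).foldl
      (fun ans a => fInner n a (PySem.List.pyRange a (n + 1) 1) ans) ans
      = ans + (gSum n n - gSum n (a0 - 1)) := by
  intro k
  induction k with
  | zero =>
    intro a0 ans ha heq
    rw [PySem.List.pyRange_one_eq_nil (by omega)]
    have : a0 - 1 = n := by omega
    rw [this]
    simp [List.foldl]
  | succ m ih =>
    intro a0 ans ha heq
    by_cases hlt : a0 < n + 1
    · rw [PySem.List.pyRange_one_cons hlt]
      show (PySem.List.pyRange (a0+1) (n+1) 1).foldl _
            (fInner n a0 (PySem.List.pyRange a0 (n + 1) 1) ans) = _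
      rw [fInner_gTerm n a0 ans ha, ih (a0 + 1) (ans + gTerm n a0) (by omega) (by omega)]
      have hS : gSum n a0 = gTerm n a0 + gSum n (a0 - 1) := by
        rw [gSum, if_pos ha]
      have : a0 + 1 - 1 = a0 := by ring
      rw [this, hS]
      ring
    · rw [PySem.List.pyRange_one_eq_nil (by omega)]
      have : a0 - 1 = n := by omega
      rw [this]
      simp [List.foldl]

-- gSum is constant beyond the last a with a^3 ≤ n
theorem gSum_const (n A : Int) (hA : 0 ≤ A) (hcube : n < (A + 1) * (A + 1) * (A + 1)) :
    ∀ k : Nat, ∀ m : Int, m = A + k → gSum n m = gSum n A := by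
  intro k
  induction k with
  | zero => intro m hm; rw [hm]; simp
  | succ j ih =>
    intro m hm
    have hm1 : 1 ≤ m := by omega
    rw [gSum, if_pos hm1]
    have hg : gTerm n m = 0 := by
      unfold gTerm
      rw [if_neg]
      intro hcon
      have hA1m : A + 1 ≤ m := by omega
      have hm0 : (0:Int) ≤ m := by omega
      have h2 : (A+1)*(A+1) ≤ m*m := mul_le_mul hA1m hA1m (by omega) hm0
      have h3 : (A+1)*(A+1)*(A+1) ≤ m*m*m := mul_le_mul h2 hA1m (by omega) (mul_nonneg hm0 hm0)
      omega
    rw [hg, ih (m - 1) (by omega)]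
    ring

-- fAmax characterisation
theorem fAmax_spec (n : Int) : ∀ m : Int, 0 ≤ m → m * m * m ≤ n →
    0 ≤ fAmax n m ∧ (fAmax n m) * (fAmax n m) * (fAmax n m) ≤ n ∧
      n < (fAmax n m + 1) * (fAmax n m + 1) * (fAmax n m + 1) := by
  intro m
  induction m using fAmax.induct n with
  | case1 m hc ih =>
    intro hm hinv
    rw [fAmax, if_pos hc]
    exact ih (by omega) hc.1
  | case2 m hc =>
    intro hm hinv
    rw [fAmax, if_neg hc]
    refine ⟨hm, hinv, ?_⟩
    by_contra h
    push_neg at h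
    have : ¬ m < n := fun hlt => hc ⟨h, hlt⟩
    push_neg at this
    nlinarith

-- B's descending loop computes gSum, threading the running root r
theorem fDown_gSum (n : Int) : ∀ a r ans : Int, 0 ≤ a →
    (1 ≤ a → 0 ≤ r ∧ r * r * a ≤ n ∧ a * a * a ≤ n) →
    fDown n a r ans = ans + gSum n a := by
  intro a r ans
  induction a, r, ans using fDown.induct n with
  | case1 a r ans ha ih =>
    intro ha0 hinv
    obtain ⟨hr, hrra, hcube⟩ := hinv ha
    rw [fDown, if_pos ha]
    have hb := fBump_spec n a r ha hr hrra
    have hbA := fBump_spec n a a ha (by omega) (by nlinarith)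
    have heq : fBump n a r = fBump n a a :=
      root_unique n a _ _ ha (by omega) (by omega) ⟨hb.2.1, hb.2.2⟩ ⟨hbA.2.1, hbA.2.2⟩
    have hrec := ih (by omega) ?_
    · rw [hrec]
      have hS : gSum n a = gTerm n a + gSum n (a - 1) := by rw [gSum, if_pos ha]
      rw [hS]
      unfold gTerm
      rw [if_pos hcube, heq]
      ring
    · intro ha1
      refine ⟨by omega, ?_, ?_⟩
      · nlinarith [hb.2.1]
      · nlinarith
  | case2 a r ans ha =>
    intro ha0 _
    rw [fDown, if_neg ha]
    have : a = 0 := by omega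
    rw [this, gSum, if_neg (by omega)]
    ring

-- ===== VERDICT (by name: the statement is the Claim_ definition above) =====
theorem f_spec : Claim_equal_f := by
  intro n _
  show f n = f_alt n
  unfold f f_alt
  by_cases hn : 0 ≤ n
  · have hA := fAmax_spec n 0 (le_refl 0) (by simpa using hn)
    set A := fAmax n 0 with hAdef
    have hfold := foldl_gSum n (n + 1 - 1).toNat 1 0 (le_refl 1) (by omega)
    rw [hfold]
    have hdown := fDown_gSum n A A 0 hA.1 ?_
    · rw [hdown]
      have hAn : A ≤ n := by nlinarith [hA.1, hA.2.1]
      have hconst := gSum_const n A hA.1 hA.2.2 (n - A).toNat n (by omega)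
      have h0 : gSum n 0 = 0 := by
        rw [gSum]
        norm_num
      have h1 : (1:Int) - 1 = 0 := by norm_num
      rw [h1, hconst, h0]
      ring
    · intro hA1
      exact ⟨hA.1, by nlinarith [hA.2.1], hA.2.1⟩
  · push_neg at hn
    rw [PySem.List.pyRange_one_eq_nil (by omega)]
    have hAm : fAmax n 0 = 0 := by
      rw [fAmax, if_neg (by push_neg; intro h; nlinarith)]
    rw [hAm, fDown, if_neg (by omega)]
    rfl
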